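-- pv_equiv track=rewrite | github.com/Anuraag-Deoda/Travel-Planner-agentic-ai | src/agents/food_culture.py | _find_matching_review
-- ===== SOURCE A (Python) =====
-- from typing import Any, Optional
--
-- def _find_matching_review(
--
--     restaurant_name: Optional[str],
--     scraped_reviews: list[dict] | None,
-- ) -> Optional[dict]:
--     """Find a matching review for a restaurant name.
--
--     Args:
--         restaurant_name: Name of the restaurant to match.
--         scraped_reviews: List of scraped reviews.
--
--     Returns:
--         Matching review data or None.
--     """
--     if not restaurant_name or not scraped_reviews:
--         return None
--
--     name_lower = restaurant_name.lower().strip()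
--
--     # Try exact match first
--     for r in scraped_reviews:
--         scraped_name = (r.get("name") or "").lower().strip()
--         if scraped_name == name_lower:
--             return r
--
--     # Try partial match
--     for r in scraped_reviews:
--         scraped_name = (r.get("name") or "").lower().strip()
--         # Check if either name contains the other
--         if name_lower in scraped_name or scraped_name in name_lower:
--             return r
--
--         # Check if main words match
--         name_words = set(name_lower.split())
--         scraped_words = set(scraped_name.split())
--         common_words = name_words & scraped_words
--         # If more than half the words match, consider it a match
--         if len(common_words) >= min(len(name_words), len(scraped_words)) / 2:
--             return r
--
--     return None
-- ===== SOURCE B (Python) =====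
-- from typing import Any, Optional
--
-- def _find_matching_review(
--     restaurant_name: Optional[str],
--     scraped_reviews: list | None,
-- ) -> Optional[dict]:
--     """Single pass: return immediately on an exact normalized-name match; remember
--     the FIRST partial match and fall back to it after the scan."""
--     if not restaurant_name or not scraped_reviews:
--         return None
--
--     name_lower = restaurant_name.lower().strip()
--     first_partial = None
--     for r in scraped_reviews:
--         scraped_name = (r.get("name") or "").lower().strip()
--         if scraped_name == name_lower:
--             return r
--         if first_partial is None:
--             if name_lower in scraped_name or scraped_name in name_lower:
--                 first_partial = r
--             else:
--                 name_words = set(name_lower.split())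
--                 scraped_words = set(scraped_name.split())
--                 common_words = name_words & scraped_words
--                 # 2*len(c) >= m  <=>  len(c) >= m/2  (exact for these int sizes)
--                 if 2 * len(common_words) >= min(len(name_words), len(scraped_words)):
--                     first_partial = r
--     return first_partial
-- ===== Notes on version B (the rewrite author's own statement) =====
-- stated objective: alternative
-- what changed: Replaced A's two full passes over scraped_reviews (one for exact matches, one re-normalizing every name for partial matches) by a single pass that normalizes each name once, returns immediately on an exact match and remembers the first partial candidate as a fallback.
import Mathlib
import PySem

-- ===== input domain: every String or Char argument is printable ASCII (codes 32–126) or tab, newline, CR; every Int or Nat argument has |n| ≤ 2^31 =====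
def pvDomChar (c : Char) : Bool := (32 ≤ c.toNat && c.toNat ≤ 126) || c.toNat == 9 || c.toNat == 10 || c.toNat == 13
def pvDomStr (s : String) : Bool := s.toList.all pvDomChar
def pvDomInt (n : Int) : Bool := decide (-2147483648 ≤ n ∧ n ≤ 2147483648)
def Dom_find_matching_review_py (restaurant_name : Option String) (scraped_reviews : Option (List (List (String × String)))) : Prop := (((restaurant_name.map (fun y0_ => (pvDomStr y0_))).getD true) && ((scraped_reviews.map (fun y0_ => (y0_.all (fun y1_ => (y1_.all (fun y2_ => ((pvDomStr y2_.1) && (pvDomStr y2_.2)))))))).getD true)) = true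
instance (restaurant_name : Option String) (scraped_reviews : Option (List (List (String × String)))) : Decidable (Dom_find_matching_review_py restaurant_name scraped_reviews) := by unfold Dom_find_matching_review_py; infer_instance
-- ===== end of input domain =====

-- B does the same matching in ONE pass (normalize each name once, return on exact,
-- remember the first partial as fallback) instead of A's two passes.

-- ===== PORT A =====
-- (r.get("name") or "").lower().strip()   ('or ""' only replaces a falsy value, i.e. "" or a
-- missing key, by "" — getD "" is exact here since values are strings)
def pvScrName (r : List (String × String)) : String :=
  PySem.Str.strip (PySem.Str.lower (((PySem.Dict.mk r).get? "name").getD ""))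

-- the partial-match test of A's second loop; 'len(common) >= min(len a, len b)/2' (float
-- division) is stated as '2*len(common) >= min(len a, len b)', exact for these integer sizes
def pvPartial (nameLower scrapedName : String) : Bool :=
  PySem.Str.isIn nameLower scrapedName || PySem.Str.isIn scrapedName nameLower ||
    (let nameWords := PySem.Set.ofList (PySem.Str.split₀ nameLower)
     let scrapedWords := PySem.Set.ofList (PySem.Str.split₀ scrapedName)
     let commonWords := PySem.Set.inter nameWords scrapedWords
     decide (2 * commonWords.length ≥ min nameWords.length scrapedWords.length))

def find_matching_review_py (restaurant_name : Option String) (scraped_reviews : Option (List (List (String × String)))) : Option (List (String × String)) :=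
  match restaurant_name, scraped_reviews with
  | some n, some rs =>
    if n = "" ∨ rs = [] then none   -- 'if not restaurant_name or not scraped_reviews'
    else
      let nameLower := PySem.Str.strip (PySem.Str.lower n)
      -- first loop: exact match
      match rs.find? (fun r => pvScrName r == nameLower) with
      | some r => some r
      | none =>
        -- second loop: partial match
        rs.find? (fun r => pvPartial nameLower (pvScrName r))
  | _, _ => none

-- ===== PORT B =====
-- Source B's single loop: state = first_partial (None until set once)
def pvAltLoop (nameLower : String) : List (List (String × String)) → Option (List (String × String)) → Option (List (String × String))
  | [], firstPartial => firstPartial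
  | r :: rest, firstPartial =>
    let scrapedName := pvScrName r
    if scrapedName == nameLower then some r
    else pvAltLoop nameLower rest
      (if firstPartial = none ∧ pvPartial nameLower scrapedName then some r else firstPartial)

def find_matching_review_py_alt (restaurant_name : Option String) (scraped_reviews : Option (List (List (String × String)))) : Option (List (String × String)) :=
  match restaurant_name with
  | none => none
  | some n =>
    match scraped_reviews with
    | none => none
    | some rs =>
      if n = "" ∨ rs = [] then none
      else pvAltLoop (PySem.Str.strip (PySem.Str.lower n)) rs none

-- ===== PRECONDITION & SPEC =====
def Spec_find_matching_review_py (restaurant_name : Option String) (scraped_reviews : Option (List (List (String × String)))) (out : Option (List (String × String))) : Prop := out = find_matching_review_py_alt restaurant_name scraped_reviews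
instance (restaurant_name : Option String) (scraped_reviews : Option (List (List (String × String)))) (out : Option (List (String × String))) : Decidable (Spec_find_matching_review_py restaurant_name scraped_reviews out) := by unfold Spec_find_matching_review_py; infer_instance

-- ===== CLAIM (what is proved, stated in full; the proofs are below) =====
def Claim_equal_find_matching_review_py : Prop := ∀ (restaurant_name : Option String) (scraped_reviews : Option (List (List (String × String)))), Dom_find_matching_review_py restaurant_name scraped_reviews → Spec_find_matching_review_py restaurant_name scraped_reviews (find_matching_review_py restaurant_name scraped_reviews)

-- ===== LEMMAS AND PROOFS =====

-- the loop invariant: B's single pass computes "first exact, else the pending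
-- first partial, else the first partial of the remainder"
theorem pvAltLoop_eq (nameLower : String) (rs : List (List (String × String)))
    (fp : Option (List (String × String))) :
    pvAltLoop nameLower rs fp =
      match rs.find? (fun r => pvScrName r == nameLower) with
      | some r => some r
      | none =>
        match fp with
        | some p => some p
        | none => rs.find? (fun r => pvPartial nameLower (pvScrName r)) := by
  induction rs generalizing fp with
  | nil => cases fp <;> simp [pvAltLoop]
  | cons r rest ih =>
    by_cases hx : pvScrName r == nameLower
    · simp [pvAltLoop, hx, List.find?]
    · have hx' : (pvScrName r == nameLower) = false := by simp [hx]
      cases fp with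
      | some p => simp [pvAltLoop, hx', List.find?, ih]
      | none =>
        by_cases hp : pvPartial nameLower (pvScrName r) <;>
          simp [pvAltLoop, hx', List.find?, ih, hp]

theorem find_matching_review_py_spec : Claim_equal_find_matching_review_py := by
  intro restaurant_name scraped_reviews _
  unfold Spec_find_matching_review_py find_matching_review_py find_matching_review_py_alt
  cases restaurant_name with
  | none => rfl
  | some n =>
    cases scraped_reviews with
    | none => rfl
    | some rs =>
      by_cases h : n = "" ∨ rs = []
      · simp [h]
      · simp only [if_neg h, pvAltLoop_eq]
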